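-- pv_equiv track=rewrite | github.com/aragonopendata/empleo-publico-aragon | legacy/src/extraccion/extraccion_ner.py | segmentar
-- ===== SOURCE A (Python) =====
-- def segmentar(texto, max_length, corte):
-- 	textos = []
-- 	lineas = texto.split(corte)
--
-- 	# Primero comprobar si hay algún texto_aux cuyo len sea mayor a max_length.
-- 	# Para ellos, ahora son = segmentar(ese subtexto, max_length, ' ').
-- 	if corte != ' ':
-- 		lineas_aux = lineas
-- 		lineas = []
-- 		for i_l, linea in enumerate(lineas_aux):
-- 			if len(linea) > max_length:
-- 				for s in segmentar(linea, max_length, ' '):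
-- 					lineas.append(s)
-- 			else:
-- 				lineas.append(linea)
-- 		del(lineas_aux)
--
-- 	iter_l = iter(lineas)
-- 	actual = next(iter_l)
-- 	for siguiente in iter_l:
-- 		if len(actual) + len(corte) + len(siguiente) > max_length:	# Si la siguiente palabra no cabe, meter lo que se tiene
-- 			textos.append(actual)
-- 			actual = siguiente
-- 		else:
-- 			actual += corte + siguiente								# Si cabe, incorporar a lo que se tiene
-- 	textos.append(actual)
-- 	return textos
-- ===== SOURCE B (Python) =====
-- def segmentar(texto, max_length, corte):
--     # Two-pointer packing over precomputed prefix sums of piece lengths: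
--     # segment boundaries are found arithmetically, then each chunk is joined once.
--     def pack(pieces, sep):
--         n = len(pieces)
--         L = len(sep)
--         pref = [0]
--         t = 0
--         for p in pieces:
--             t += len(p)
--             pref.append(t)
--         res = []
--         s = 0
--         while s < n:
--             e = s
--             while e + 1 < n and pref[e + 2] - pref[s] + (e + 1 - s) * L <= max_length:
--                 e += 1
--             res.append(sep.join(pieces[s:e + 1]))
--             s = e + 1
--         return res
--
--     lineas = texto.split(corte)
--     if corte != ' ':
--         out = []
--         for linea in lineas:
--             if len(linea) > max_length:
--                 out.extend(pack(linea.split(' '), ' '))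
--             else:
--                 out.append(linea)
--         lineas = out
--     return pack(lineas, corte)
-- ===== Notes on version B (the rewrite author's own statement) =====
-- stated objective: alternative
-- what changed: Replaces A's recursive greedy string-accumulator with a two-pointer pack over precomputed prefix sums of piece lengths: segment boundaries are found arithmetically (no running string), each chunk is then joined once with sep.join on a slice, and A's self-recursion becomes a flattening loop calling pack on the space-split words.
-- outside the precondition, e.g. on segmentar('ab', 5, ''): A raises ValueError, B raises ValueError
import Mathlib
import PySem

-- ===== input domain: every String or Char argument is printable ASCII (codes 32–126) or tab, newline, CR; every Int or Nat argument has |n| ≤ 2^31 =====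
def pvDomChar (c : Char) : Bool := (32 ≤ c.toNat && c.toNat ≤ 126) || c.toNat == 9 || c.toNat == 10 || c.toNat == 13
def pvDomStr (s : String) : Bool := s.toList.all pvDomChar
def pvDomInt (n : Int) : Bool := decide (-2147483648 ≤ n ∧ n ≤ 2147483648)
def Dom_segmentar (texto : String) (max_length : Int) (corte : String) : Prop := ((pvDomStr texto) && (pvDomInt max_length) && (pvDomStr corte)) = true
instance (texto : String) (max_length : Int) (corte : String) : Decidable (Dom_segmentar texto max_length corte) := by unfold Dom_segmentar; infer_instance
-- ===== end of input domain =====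

-- ===== PORT A =====
-- B replaces A's recursive greedy string accumulation by a two-pointer scan over
-- prefix sums of piece lengths (boundaries found arithmetically, each chunk joined
-- once); objective: alternative algorithm, same cost.
-- Ports work on List Char (PySem.Chars) and wrap to String at the boundary.

-- the for-loop over iter_l: state (textos, actual), appended at the end
def segAFold (max_length : Int) (corte : List Char) : List (List Char) → List (List Char) → List Char → List (List Char)
  | [], textos, actual => textos ++ [actual]
  | sig :: rest, textos, actual =>
    if (actual.length : Int) + corte.length + sig.length > max_length then
      segAFold max_length corte rest (textos ++ [actual]) sig
    else
      segAFold max_length corte rest textos (actual ++ corte ++ sig)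

mutual
-- A's body: split, optional flattening loop with the recursive call, then the greedy loop
def segmentarC (texto : List Char) (max_length : Int) (corte : List Char) : List (List Char) :=
  let lineas := PySem.Chars.splitOn texto corte
  let lineas2 := if _h : corte = [' '] then lineas else segAFlat max_length lineas
  match lineas2 with
  | [] => []  -- unreachable: split never returns an empty list (guard for totality)
  | actual :: rest => segAFold max_length corte rest [] actual
termination_by ((if corte = [' '] then 0 else 2), 0)
decreasing_by simp [Prod.lex_def, *]

-- A's "for i_l, linea in enumerate(lineas_aux)" appending loop (corte ≠ ' ' branch)
def segAFlat (max_length : Int) : List (List Char) → List (List Char)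
  | [] => []
  | linea :: rest =>
    (if (linea.length : Int) > max_length then segmentarC linea max_length [' ']
     else [linea]) ++ segAFlat max_length rest
termination_by ls => (1, ls.length + 1)
decreasing_by
  · simp [Prod.lex_def]
  · simp [Prod.lex_def]
end

def segmentar (texto : String) (max_length : Int) (corte : String) : List String :=
  (segmentarC texto.toList max_length corte.toList).map (fun cs => String.ofList cs)

-- ===== PORT B =====
-- pref = [0]; t = 0; for p in pieces: t += len(p); pref.append(t)
def prefB (pieces : List (List Char)) : List Int :=
  (pieces.foldl (fun (st : List Int × Int) p =>
    (st.1 ++ [st.2 + (p.length : Int)], st.2 + (p.length : Int))) ([0], 0)).1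

-- inner while: advance e while the next piece still fits (pref indices are in range:
-- 0 ≤ s ≤ e+2 ≤ n < len pref, so List.getD is exactly Python's pref[i])
def innerB (pref : List Int) (n : Nat) (L ml : Int) (s : Nat) (e : Nat) : Nat :=
  if e + 1 < n ∧ pref.getD (e + 2) 0 - pref.getD s 0 + ((e + 1 - s : Nat) : Int) * L ≤ ml
  then innerB pref n L ml s (e + 1) else e
termination_by n - e

-- termination fact for the outer while loop (s := e+1 strictly increases)
theorem innerB_ge (pref : List Int) (n : Nat) (L ml : Int) (s e : Nat) :
    e ≤ innerB pref n L ml s e := by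
  unfold innerB
  split
  · exact le_trans (Nat.le_succ e) (innerB_ge pref n L ml s (e + 1))
  · exact le_refl e
termination_by n - e

-- outer while: res.append(sep.join(pieces[s:e+1])); s = e+1
-- (pieces[s:e+1] = (pieces.drop s).take (e+1-s) by PySem.List.slice_natCast, s,e+1 : Nat)
def outerB (pieces : List (List Char)) (pref : List Int) (n : Nat) (sep : List Char)
    (L ml : Int) (s : Nat) : List (List Char) :=
  if h : s < n then
    let e := innerB pref n L ml s s
    PySem.Chars.join sep ((pieces.drop s).take (e + 1 - s)) ::
      outerB pieces pref n sep L ml (e + 1)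
  else []
termination_by n - s
decreasing_by
  have := innerB_ge pref n L ml s s
  omega

def packB (ml : Int) (sep : List Char) (pieces : List (List Char)) : List (List Char) :=
  outerB pieces (prefB pieces) pieces.length sep (sep.length : Int) ml 0

def segmentarAltC (texto : List Char) (ml : Int) (corte : List Char) : List (List Char) :=
  let lineas := PySem.Chars.splitOn texto corte
  let lineas2 := if corte ≠ [' '] then
      lineas.foldl (fun out linea =>
        out ++ (if (linea.length : Int) > ml then
                  packB ml [' '] (PySem.Chars.splitOn linea [' '])
                else [linea])) []
    else lineas
  packB ml corte lineas2

def segmentar_alt (texto : String) (max_length : Int) (corte : String) : List String :=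
  (segmentarAltC texto.toList max_length corte.toList).map (fun cs => String.ofList cs)

-- ===== PRECONDITION & SPEC =====
-- Pre_ excludes corte = "": there Python's str.split raises ValueError (empty separator).
def Pre_segmentar (texto : String) (max_length : Int) (corte : String) : Prop := corte ≠ ""
instance (texto : String) (max_length : Int) (corte : String) : Decidable (Pre_segmentar texto max_length corte) := by unfold Pre_segmentar; infer_instance
def pvWitness_segmentar : String × Int × String := ("one two three", 8, " ")

def Spec_segmentar (texto : String) (max_length : Int) (corte : String) (out : List String) : Prop := out = segmentar_alt texto max_length corte
instance (texto : String) (max_length : Int) (corte : String) (out : List String) : Decidable (Spec_segmentar texto max_length corte out) := by unfold Spec_segmentar; infer_instance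

-- ===== CLAIM (what is proved, stated in full; the proofs are below) =====
def Claim_equal_segmentar : Prop := ∀ (texto : String) (max_length : Int) (corte : String), Dom_segmentar texto max_length corte → Pre_segmentar texto max_length corte → Spec_segmentar texto max_length corte (segmentar texto max_length corte)

-- ===== LEMMAS AND PROOFS =====

-- total length of a list of pieces, as an Int
def sumLen (l : List (List Char)) : Int := (l.map (fun p => (p.length : Int))).sum

-- the join of pieces[s:k]
def sliceJ (sep : List Char) (pieces : List (List Char)) (s k : Nat) : List Char :=
  PySem.Chars.join sep ((pieces.drop s).take (k - s))

theorem prefB_foldl (ps : List (List Char)) : ∀ (acc : List Int) (t : Int),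
    ps.foldl (fun (st : List Int × Int) p =>
      (st.1 ++ [st.2 + (p.length : Int)], st.2 + (p.length : Int))) (acc, t)
    = (acc ++ (List.range ps.length).map (fun i => t + sumLen (ps.take (i + 1))),
       t + sumLen ps) := by
  induction ps with
  | nil => intro acc t; simp [sumLen]
  | cons p ps ih =>
    intro acc t
    simp only [List.foldl_cons, ih]
    rw [Prod.mk.injEq]
    refine ⟨?_, by simp [sumLen]; ring⟩
    rw [List.length_cons, List.range_succ_eq_map]
    simp only [List.map_cons, List.map_map]
    rw [List.append_assoc]
    congr 1
    · simp [sumLen]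
      intro a _
      ring

theorem prefB_getD (pieces : List (List Char)) (i : Nat) (hi : i ≤ pieces.length) :
    (prefB pieces).getD i 0 = sumLen (pieces.take i) := by
  unfold prefB
  rw [prefB_foldl]
  cases i with
  | zero => simp [sumLen]
  | succ j =>
    have hj : j < pieces.length := by omega
    simp only [List.cons_append, List.nil_append, List.getD_cons_succ]
    rw [PySem.List.getD_map_range _ _ _ _ hj]
    ring

theorem sumLen_append (a b : List (List Char)) : sumLen (a ++ b) = sumLen a + sumLen b := by
  simp [sumLen]

theorem sumLen_slice (pieces : List (List Char)) (s k : Nat) (hsk : s ≤ k) :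
    sumLen ((pieces.drop s).take (k - s)) = sumLen (pieces.take k) - sumLen (pieces.take s) := by
  have hk : k = s + (k - s) := by omega
  rw [hk, List.take_add, sumLen_append]
  ring_nf
  congr 2
  omega

-- length of the join of a nonempty list
theorem lenJoin (sep : List Char) (a : List Char) (l : List (List Char)) :
    ((PySem.Chars.join sep (a :: l)).length : Int)
      = sumLen (a :: l) + (l.length : Int) * sep.length := by
  induction l generalizing a with
  | nil => simp [PySem.Chars.join_singleton, sumLen]
  | cons b l ih =>
    rw [PySem.Chars.join_cons_cons]
    simp only [List.length_append, List.length_cons]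
    push_cast
    rw [show ((PySem.Chars.join sep (b :: l)).length : Int)
          = sumLen (b :: l) + (l.length : Int) * sep.length from ih b]
    simp [sumLen]
    ring

theorem join_append_singleton (sep : List Char) (a : List Char) (l : List (List Char)) (x : List Char) :
    PySem.Chars.join sep ((a :: l) ++ [x]) = PySem.Chars.join sep (a :: l) ++ sep ++ x := by
  induction l generalizing a with
  | nil => simp [PySem.Chars.join_cons_cons, PySem.Chars.join_singleton]
  | cons b l ih =>
    simp only [List.cons_append] at ih ⊢
    rw [PySem.Chars.join_cons_cons, ih b, PySem.Chars.join_cons_cons]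
    simp

-- the slice pieces[s:k] as a cons of the head (s < k) — for nonemptiness
theorem slice_cons (pieces : List (List Char)) (s k : Nat) (hs : s < pieces.length) (hk : s < k) :
    (pieces.drop s).take (k - s) = pieces[s] :: (pieces.drop (s + 1)).take (k - (s + 1)) := by
  rw [List.drop_eq_getElem_cons hs]
  have h1 : k - s = (k - (s + 1)) + 1 := by omega
  rw [h1, List.take_succ_cons]

theorem slice_snoc (pieces : List (List Char)) (s j : Nat) (hs : s ≤ j) (hj : j < pieces.length) :
    (pieces.drop s).take (j + 1 - s) = (pieces.drop s).take (j - s) ++ [pieces[j]] := by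
  have h1 : j + 1 - s = (j - s) + 1 := by omega
  rw [h1, List.take_add_one, List.getElem?_drop]
  have h2 : s + (j - s) = j := by omega
  rw [h2, List.getElem?_eq_getElem hj]
  simp

-- flushing: the textos accumulator factors out front
theorem segAFold_shift (ml : Int) (c : List Char) (rest : List (List Char)) :
    ∀ (textos : List (List Char)) (actual : List Char),
    segAFold ml c rest textos actual = textos ++ segAFold ml c rest [] actual := by
  induction rest with
  | nil => intro textos actual; simp [segAFold]
  | cons sig rest ih =>
    intro textos actual
    simp only [segAFold]
    by_cases h : (actual.length : Int) + c.length + sig.length > ml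
    · simp only [if_pos h, List.nil_append]
      rw [ih (textos ++ [actual]) sig, ih [actual] sig]
      simp
    · simp only [if_neg h, List.nil_append]
      rw [ih textos (actual ++ c ++ sig)]

mutual
-- MAIN: A's greedy loop, having consumed pieces[s..j] into actual = join(pieces[s:j+1]),
-- produces exactly B's two-pointer segments from position s (inner pointer at j)
theorem segMain (ml : Int) (sep : List Char) (pieces : List (List Char)) (s j : Nat)
    (hsj : s ≤ j) (hj : j < pieces.length) :
    segAFold ml sep (pieces.drop (j + 1)) [] (sliceJ sep pieces s (j + 1))
      = sliceJ sep pieces s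
          (innerB (prefB pieces) pieces.length (sep.length : Int) ml s j + 1)
        :: outerB pieces (prefB pieces) pieces.length sep (sep.length : Int) ml
          (innerB (prefB pieces) pieces.length (sep.length : Int) ml s j + 1) := by
  by_cases hend : j + 1 < pieces.length
  · -- more pieces remain
    have hsnoc : (pieces.drop s).take (j + 1 + 1 - s)
        = (pieces.drop s).take (j + 1 - s) ++ [pieces[j + 1]] :=
      slice_snoc pieces s (j + 1) (by omega) hend
    have hact : sliceJ sep pieces s (j + 1 + 1)
        = sliceJ sep pieces s (j + 1) ++ sep ++ pieces[j + 1] := by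
      simp only [sliceJ]
      rw [hsnoc, slice_cons pieces s (j + 1) (by omega) (by omega)]
      exact join_append_singleton sep _ _ _
    have hlen1 : ((sliceJ sep pieces s (j + 1 + 1)).length : Int)
        = (prefB pieces).getD (j + 1 + 1) 0 - (prefB pieces).getD s 0
          + ((j + 1 - s : Nat) : Int) * sep.length := by
      simp only [sliceJ]
      rw [slice_cons pieces s (j + 1 + 1) (by omega) (by omega), lenJoin,
          ← slice_cons pieces s (j + 1 + 1) (by omega) (by omega),
          sumLen_slice pieces s (j + 1 + 1) (by omega),
          prefB_getD pieces (j + 1 + 1) (by omega), prefB_getD pieces s (by omega)]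
      have hl : ((pieces.drop (s + 1)).take (j + 1 + 1 - (s + 1))).length = j + 1 - s := by
        rw [List.length_take, List.length_drop]
        omega
      rw [hl]
    have hcondeq :
        (prefB pieces).getD (j + 1 + 1) 0 - (prefB pieces).getD s 0
            + ((j + 1 - s : Nat) : Int) * sep.length
          = ((sliceJ sep pieces s (j + 1)).length : Int) + sep.length + (pieces[j + 1]).length := by
      rw [← hlen1, hact]
      push_cast [List.length_append]
      ring
    rw [List.drop_eq_getElem_cons hend, innerB]
    by_cases hfit : (prefB pieces).getD (j + 1 + 1) 0 - (prefB pieces).getD s 0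
        + ((j + 1 - s : Nat) : Int) * sep.length ≤ ml
    · -- next piece fits: both continue with j+1
      rw [if_pos ⟨hend, hfit⟩, segAFold]
      have hgr : ¬ (((sliceJ sep pieces s (j + 1)).length : Int) + sep.length
          + (pieces[j + 1]).length > ml) := by
        rw [← hcondeq]; omega
      rw [if_neg hgr, ← hact]
      exact segMain ml sep pieces s (j + 1) (by omega) hend
    · -- next piece does not fit: A flushes, B closes the chunk at j
      rw [if_neg (fun h => hfit h.2), segAFold]
      have hgr : ((sliceJ sep pieces s (j + 1)).length : Int) + sep.length
          + (pieces[j + 1]).length > ml := by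
        rw [← hcondeq]; omega
      rw [if_pos hgr, segAFold_shift]
      simp only [List.nil_append, List.singleton_append]
      have hnext : (pieces[j + 1] : List Char) = sliceJ sep pieces (j + 1) (j + 1 + 1) := by
        simp only [sliceJ]
        rw [slice_cons pieces (j + 1) (j + 1 + 1) hend (by omega)]
        simp [PySem.Chars.join_singleton]
      rw [hnext, segStart ml sep pieces (j + 1) hend]
  · -- j was the last piece
    have hdrop : pieces.drop (j + 1) = [] := by
      rw [List.drop_eq_nil_iff]; omega
    rw [hdrop, innerB, if_neg (fun h => absurd h.1 hend)]
    rw [outerB, dif_neg (by omega)]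
    simp [segAFold]
termination_by (pieces.length - j, 1)

-- starting a fresh chunk at position s is exactly outerB from s
theorem segStart (ml : Int) (sep : List Char) (pieces : List (List Char)) (s : Nat)
    (hs : s < pieces.length) :
    segAFold ml sep (pieces.drop (s + 1)) [] (sliceJ sep pieces s (s + 1))
      = outerB pieces (prefB pieces) pieces.length sep (sep.length : Int) ml s := by
  rw [segMain ml sep pieces s s (le_refl s) hs]
  conv_rhs => rw [outerB]
  rw [dif_pos hs]
  simp only [sliceJ]
termination_by (pieces.length - s, 2)
end

theorem packB_eq_greedy (ml : Int) (sep : List Char) (pieces : List (List Char)) :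
    (match pieces with
      | [] => ([] : List (List Char))
      | actual :: rest => segAFold ml sep rest [] actual) = packB ml sep pieces := by
  cases pieces with
  | nil => rw [packB, outerB]; simp
  | cons a rest =>
    rw [packB, ← segStart ml sep (a :: rest) 0 (by simp)]
    simp [sliceJ, PySem.Chars.join_singleton, List.take_succ_cons]

-- A with corte = ' ' (the recursive call's shape) IS B's pack of the space-split pieces
theorem segmentarC_space (texto : List Char) (ml : Int) :
    segmentarC texto ml [' '] = packB ml [' '] (PySem.Chars.splitOn texto [' ']) := by
  rw [segmentarC, dif_pos rfl]
  exact packB_eq_greedy ml [' '] (PySem.Chars.splitOn texto [' '])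

-- A's flattening loop is B's appending fold
theorem segAFlat_eq_flatMap (ml : Int) (ls : List (List Char)) :
    segAFlat ml ls = ls.flatMap (fun linea =>
      if (linea.length : Int) > ml then
        packB ml [' '] (PySem.Chars.splitOn linea [' '])
      else [linea]) := by
  induction ls with
  | nil => simp [segAFlat]
  | cons l ls ih =>
    rw [segAFlat, ih, List.flatMap_cons]
    by_cases h : (l.length : Int) > ml
    · simp [h, segmentarC_space]
    · simp [h]

theorem segmentarC_eq_alt (texto : List Char) (ml : Int) (c : List Char) :
    segmentarC texto ml c = segmentarAltC texto ml c := by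
  rw [segmentarC]
  unfold segmentarAltC
  by_cases h : c = [' ']
  · simp only [h, ne_eq, not_true_eq_false, if_false]
    exact packB_eq_greedy ml [' '] (PySem.Chars.splitOn texto [' '])
  · simp only [ne_eq, h, not_false_eq_true, if_true,
      PySem.List.foldl_append_eq_flatMap, List.nil_append, segAFlat_eq_flatMap]
    exact packB_eq_greedy ml c _

-- ===== VERDICT (by name: the statement is the Claim_ definition above) =====
theorem segmentar_spec : Claim_equal_segmentar := by
  intro texto max_length corte _ _
  unfold Spec_segmentar segmentar segmentar_alt
  rw [segmentarC_eq_alt]
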